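-- pv_equiv track=rewrite | github.com/augustoaccorsi/barebone-flask-rest-api | autoscaling/scale-down.py | get_instances_ids
-- ===== SOURCE A (Python) =====
-- INSTANCE_ID = "InstanceId\": \""
--
-- def get_instances_ids(output):
--     aux = str(output).split(INSTANCE_ID)
--     instances = [None] * (len(aux)-1)
--     count = 0
--     for i in range(len(aux)):
--         if i > 0:
--             instances[count] = aux[i].split('\"')[0]
--             count +=1
--     return instances
-- ===== SOURCE B (Python) =====
-- INSTANCE_ID = "InstanceId\": \""
--
-- def get_instances_ids(output):
--     s = str(output)
--     res = []
--     _head, found, rest = s.partition(INSTANCE_ID)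
--     while found:
--         piece, found, rest = rest.partition(INSTANCE_ID)
--         res.append(piece.partition('"')[0])
--     return res
-- ===== Notes on version B (the rewrite author's own statement) =====
-- stated objective: simpler
-- what changed: A splits the whole string into a list, preallocates a [None]*k buffer and fills it with an index/counter loop over range(len(aux)); B does a single partition-driven scan over the remaining string, appending each piece's pre-quote prefix directly, with no intermediate list, buffer, counter or per-piece re-split.
import Mathlib
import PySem

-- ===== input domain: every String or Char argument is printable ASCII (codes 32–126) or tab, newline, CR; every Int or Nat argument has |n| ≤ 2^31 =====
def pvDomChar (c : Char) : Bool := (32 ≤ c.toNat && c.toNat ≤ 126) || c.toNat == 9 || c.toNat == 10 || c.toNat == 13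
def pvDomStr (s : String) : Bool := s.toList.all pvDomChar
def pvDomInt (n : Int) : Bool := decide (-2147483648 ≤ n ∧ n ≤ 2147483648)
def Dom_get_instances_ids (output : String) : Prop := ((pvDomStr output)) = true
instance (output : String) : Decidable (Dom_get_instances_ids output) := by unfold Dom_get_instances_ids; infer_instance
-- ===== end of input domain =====

-- B replaces A's split-into-a-list + preallocated-slot index loop by a single
-- partition-driven scan over the remaining string (objective: simpler; same cost).

def pvSep : List Char := "InstanceId\": \"".toList
def pvQuote : List Char := "\"".toList

-- ===== PORT A =====
def get_instances_ids (output : String) : List String :=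
  let aux := PySem.Chars.splitOn output.toList pvSep
  let instances : List (Option (List Char)) := List.replicate (aux.length - 1) none
  let r := (PySem.List.pyRange 0 (aux.length : Int)).foldl
    (fun (st : List (Option (List Char)) × Nat) (i : Int) =>
      if i > 0 then
        (st.1.set st.2 (some (((PySem.Chars.splitOn ((PySem.List.pyGet? aux i).getD []) pvQuote)[0]?).getD [])), st.2 + 1)
      else st) (instances, 0)
  r.1.map (fun o => String.ofList (o.getD []))

-- ===== PORT B =====
def pvPartition (s sep : List Char) : List Char × List Char × List Char :=
  let i := PySem.Chars.find s sep
  if i = -1 then (s, [], []) else (s.take i.toNat, sep, s.drop (i.toNat + sep.length))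

def pvAltGo : Nat → List Char → List String → List String
  | 0, _, res => res
  | fuel+1, rest, res =>
    let p := pvPartition rest pvSep
    let res' := res ++ [String.ofList (pvPartition p.1 pvQuote).1]
    if p.2.1 = [] then res' else pvAltGo fuel p.2.2 res'

def get_instances_ids_alt (output : String) : List String :=
  let s := output.toList
  let t := pvPartition s pvSep
  if t.2.1 = [] then [] else pvAltGo (s.length + 1) t.2.2 []

-- ===== PRECONDITION & SPEC =====
def Spec_get_instances_ids (output : String) (out : List String) : Prop := out = get_instances_ids_alt output
instance (output : String) (out : List String) : Decidable (Spec_get_instances_ids output out) := by unfold Spec_get_instances_ids; infer_instance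

-- ===== CLAIM (what is proved, stated in full; the proofs are below) =====
def Claim_equal_get_instances_ids : Prop := ∀ (output : String), Dom_get_instances_ids output → Spec_get_instances_ids output (get_instances_ids output)

-- ===== LEMMAS AND PROOFS =====
theorem pv_find_infix {l sub : List Char} (h : PySem.Chars.find l sub ≠ -1) : sub <:+: l := by
  by_cases h0 : 0 ≤ PySem.Chars.find l sub
  · exact (PySem.Chars.find_nonneg_iff l sub).mp h0
  · exact absurd ((PySem.Chars.find_eq_neg_one_iff l sub).mpr
      (fun hi => h0 ((PySem.Chars.find_nonneg_iff l sub).mpr hi))) h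

def pvSplitF (c : Char) (cs : List Char) (l : List Char) : List (List Char) :=
  let i := PySem.Chars.find l (c :: cs)
  if h : i = -1 then [l]
  else l.take i.toNat :: pvSplitF c cs (l.drop (i.toNat + (c :: cs).length))
termination_by l.length
decreasing_by
  have hlen : (c :: cs).length ≤ l.length := (pv_find_infix h).length_le
  simp only [List.length_drop, List.length_cons] at *
  omega

theorem pvSplitF_ne_nil (c : Char) (cs l : List Char) : pvSplitF c cs l ≠ [] := by
  rw [pvSplitF]
  split <;> simp

def pvConsHead (p : List Char) : List (List Char) → List (List Char)
  | [] => [p]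
  | x :: xs => (p ++ x) :: xs

theorem pvConsHead_consHead (p q : List Char) (L : List (List Char)) :
    pvConsHead p (pvConsHead q L) = pvConsHead (p ++ q) L := by
  cases L <;> simp [pvConsHead]

theorem pv_find_nil_of_ne {sub : List Char} (h : sub ≠ []) : PySem.Chars.find [] sub = -1 := by
  rw [PySem.Chars.find_eq_neg_one_iff]
  intro hinf
  exact h (List.eq_nil_of_infix_nil hinf)

theorem pv_find_of_prefix {l sub : List Char} (hne : sub ≠ []) (h : sub <+: l) :
    PySem.Chars.find l sub = 0 := by
  have h0 : 0 ≤ PySem.Chars.find l sub := (PySem.Chars.find_nonneg_iff l sub).mpr h.isInfix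
  have hs := PySem.Chars.find_spec h0
  by_contra hne0
  have : (0:Nat) < (PySem.Chars.find l sub).toNat := by omega
  exact hs.2 0 this (by simpa using h)

theorem pv_find_cons_of_not_prefix {c : Char} {cs : List Char} {a : Char} {rest : List Char}
    (h : ¬ (c :: cs) <+: (a :: rest)) :
    PySem.Chars.find (a :: rest) (c :: cs)
      = if PySem.Chars.find rest (c :: cs) = -1 then -1
        else PySem.Chars.find rest (c :: cs) + 1 := by
  by_cases hr : PySem.Chars.find rest (c :: cs) = -1
  · simp only [hr, if_pos]
    rw [PySem.Chars.find_eq_neg_one_iff]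
    intro hinf
    rcases List.infix_cons_iff.mp hinf with hp | hi
    · exact h hp
    · exact absurd ((PySem.Chars.find_eq_neg_one_iff rest (c :: cs)).not.mpr (by simp [hi])) (by simp [hr])
  · simp only [hr, if_neg, if_false]
    have hrinf : (c :: cs) <:+: rest := pv_find_infix hr
    have hr0 : 0 ≤ PySem.Chars.find rest (c :: cs) := (PySem.Chars.find_nonneg_iff _ _).mpr hrinf
    have hl0 : 0 ≤ PySem.Chars.find (a :: rest) (c :: cs) :=
      (PySem.Chars.find_nonneg_iff _ _).mpr (hrinf.trans ((List.suffix_cons a rest).isInfix))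
    have hsl := PySem.Chars.find_spec hl0
    have hsr := PySem.Chars.find_spec hr0
    set k := (PySem.Chars.find (a :: rest) (c :: cs)).toNat with hk
    set j := (PySem.Chars.find rest (c :: cs)).toNat with hj
    have hkne : k ≠ 0 := by
      intro h0
      exact h (by simpa [h0] using hsl.1)
    -- k - 1 ≥ j by minimality on rest side; j + 1 ≥ k by minimality on (a::rest)
    have h1 : ¬ (k - 1 < j) := by
      intro hlt
      have := hsr.2 (k - 1) hlt
      apply this
      have := hsl.1
      rwa [show List.drop k (a :: rest) = List.drop (k-1) rest by
        obtain ⟨m, hm⟩ : ∃ m, k = m+1 := ⟨k-1, by omega⟩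
        rw [hm]; simp] at this
    have h2 : ¬ (j + 1 < k) := by
      intro hlt
      exact hsl.2 (j+1) hlt (by simpa using hsr.1)
    omega

theorem pvSplitF_cons_of_not_prefix (c : Char) (cs : List Char) (a : Char) (rest : List Char)
    (h : ¬ (c :: cs) <+: (a :: rest)) :
    pvSplitF c cs (a :: rest) = pvConsHead [a] (pvSplitF c cs rest) := by
  rcases eq_or_ne (PySem.Chars.find rest (c :: cs)) (-1) with hr | hr
  · have h2 : pvSplitF c cs rest = [rest] := by rw [pvSplitF]; simp [hr]
    have h1 : PySem.Chars.find (a :: rest) (c :: cs) = -1 := by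
      rw [pv_find_cons_of_not_prefix h, hr]; simp
    rw [pvSplitF]; simp [h1, h2, pvConsHead]
  · have hr0 : 0 ≤ PySem.Chars.find rest (c :: cs) :=
      (PySem.Chars.find_nonneg_iff _ _).mpr (pv_find_infix hr)
    have h1 : PySem.Chars.find (a :: rest) (c :: cs) = PySem.Chars.find rest (c :: cs) + 1 := by
      rw [pv_find_cons_of_not_prefix h]; simp [hr]
    have ht : (PySem.Chars.find rest (c :: cs) + 1).toNat
        = (PySem.Chars.find rest (c :: cs)).toNat + 1 := by omega
    conv_lhs => rw [pvSplitF]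
    conv_rhs => rw [pvSplitF]
    rw [dif_neg (by rw [h1]; omega), dif_neg hr]
    simp only [pvConsHead, h1, ht, List.take_succ_cons, List.length_cons, List.cons.injEq,
      List.singleton_append, true_and]
    rw [show (PySem.Chars.find rest (c :: cs)).toNat + 1 + (cs.length + 1)
        = ((PySem.Chars.find rest (c :: cs)).toNat + (cs.length + 1)) + 1 by omega,
      List.drop_succ_cons]

theorem pv_go_spec (c : Char) (cs : List Char) :
    ∀ (fuel : Nat) (l cur : List Char) (acc : List (List Char)), l.length ≤ fuel →
      PySem.Chars.splitOn.go (c :: cs) fuel l cur acc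
        = acc.reverse ++ pvConsHead cur.reverse (pvSplitF c cs l) := by
  intro fuel
  induction fuel with
  | zero =>
    intro l cur acc hl
    have : l = [] := by cases l <;> simp_all
    subst this
    rw [pvSplitF]
    simp [PySem.Chars.splitOn.go, pv_find_nil_of_ne (List.cons_ne_nil c cs), pvConsHead]
  | succ fuel ih =>
    intro l cur acc hl
    cases l with
    | nil =>
      rw [pvSplitF]
      simp [PySem.Chars.splitOn.go, pv_find_nil_of_ne (List.cons_ne_nil c cs), pvConsHead]
    | cons a rest =>
      by_cases hp : (c :: cs).isPrefixOf (a :: rest)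
      · have hpre : (c :: cs) <+: (a :: rest) := by
          rwa [List.isPrefixOf_iff_prefix] at hp
        have hlen : (c :: cs).length ≤ (a :: rest).length := hpre.length_le
        rw [show PySem.Chars.splitOn.go (c :: cs) (fuel + 1) (a :: rest) cur acc
            = PySem.Chars.splitOn.go (c :: cs) fuel (List.drop (c :: cs).length (a :: rest)) []
                (cur.reverse :: acc) by
          simp [PySem.Chars.splitOn.go, hp]]
        rw [ih _ _ _ (by simp at hl hlen ⊢; omega)]
        have hf : PySem.Chars.find (a :: rest) (c :: cs) = 0 :=
          pv_find_of_prefix (List.cons_ne_nil c cs) hpre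
        conv_rhs => rw [pvSplitF]
        rw [dif_neg (by rw [hf]; decide)]
        rw [hf]
        obtain ⟨y, ys, hys⟩ : ∃ y ys, pvSplitF c cs (List.drop ((0:Int).toNat + (c :: cs).length) (a :: rest)) = y :: ys := by
          rcases hX : pvSplitF c cs (List.drop ((0:Int).toNat + (c :: cs).length) (a :: rest)) with _ | ⟨y, ys⟩
          · exact absurd hX (pvSplitF_ne_nil c cs _)
          · exact ⟨y, ys, rfl⟩
        simp only [Int.toNat_zero, zero_add, Int.toNat_natCast] at hys ⊢
        rw [hys]
        simp [pvConsHead]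
      · have hnp : ¬ (c :: cs) <+: (a :: rest) := by
          rwa [List.isPrefixOf_iff_prefix] at hp
        rw [show PySem.Chars.splitOn.go (c :: cs) (fuel + 1) (a :: rest) cur acc
            = PySem.Chars.splitOn.go (c :: cs) fuel rest (a :: cur) acc by
          simp [PySem.Chars.splitOn.go, hp]]
        rw [ih _ _ _ (by simp at hl ⊢; omega)]
        rw [pvSplitF_cons_of_not_prefix c cs a rest hnp, pvConsHead_consHead]
        simp




theorem pvSep_eq : pvSep = 'I' :: "nstanceId\": \"".toList := rfl

theorem pv_splitOn_eq (c : Char) (cs l : List Char) :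
    PySem.Chars.splitOn l (c :: cs) = pvSplitF c cs l := by
  rw [PySem.Chars.splitOn, pv_go_spec c cs _ _ _ _ (by omega)]
  obtain ⟨y, ys, hys⟩ : ∃ y ys, pvSplitF c cs l = y :: ys := by
    rcases hX : pvSplitF c cs l with _ | ⟨y, ys⟩
    · exact absurd hX (pvSplitF_ne_nil c cs l)
    · exact ⟨y, ys, rfl⟩
  rw [hys]
  simp [pvConsHead]

theorem pvAltGo_spec (c : Char) (cs : List Char) (hsep : pvSep = c :: cs) :
    ∀ (fuel : Nat) (rest : List Char) (res : List String),
    rest.length < fuel →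
    pvAltGo fuel rest res
      = res ++ (pvSplitF c cs rest).map
          (fun p => String.ofList (pvPartition p pvQuote).1) := by
  intro fuel
  induction fuel with
  | zero => intro rest res h; omega
  | succ fuel ih =>
    intro rest res h
    rw [pvAltGo]
    rcases eq_or_ne (PySem.Chars.find rest pvSep) (-1) with hr | hr
    · have hpart : pvPartition rest pvSep = (rest, [], []) := by
        rw [pvPartition]; simp [hr]
      rw [pvSplitF, ← hsep]
      simp [hpart, hr]
    · have hpart : pvPartition rest pvSep
          = (rest.take (PySem.Chars.find rest pvSep).toNat, pvSep,
             rest.drop ((PySem.Chars.find rest pvSep).toNat + pvSep.length)) := by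
        rw [pvPartition]; simp [hr]
      have hinf : pvSep <:+: rest := pv_find_infix hr
      have hlen : pvSep.length ≤ rest.length := hinf.length_le
      have h1 : 1 ≤ pvSep.length := by rw [hsep]; simp
      rw [hpart]
      rw [if_neg (by simp [hsep])]
      rw [ih _ _ (by simp only [List.length_drop]; omega)]
      conv_rhs => rw [pvSplitF, ← hsep]
      rw [dif_neg hr]
      simp [hsep]

theorem pv_fold (aux : List (List Char)) :
    ∀ (rest pre done : List (List Char)), aux = pre ++ rest → pre.length = done.length + 1 →
    (PySem.List.pyRange ((pre.length : Nat) : Int) (aux.length : Int)).foldl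
      (fun (st : List (Option (List Char)) × Nat) (i : Int) =>
        if i > 0 then
          (st.1.set st.2 (some (((PySem.Chars.splitOn ((PySem.List.pyGet? aux i).getD []) pvQuote)[0]?).getD [])), st.2 + 1)
        else st)
      (done.map some ++ List.replicate rest.length (none : Option (List Char)), done.length)
    = (done.map some ++ rest.map (fun p => some (((PySem.Chars.splitOn p pvQuote)[0]?).getD [])),
       done.length + rest.length) := by
  intro rest
  induction rest with
  | nil =>
    intro pre done haux hlen
    rw [PySem.List.pyRange_one_eq_nil (by rw [haux]; simp)]
    simp
  | cons r rest ih =>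
    intro pre done haux hlen
    have hlt : ((pre.length : Nat) : Int) < ((aux.length : Nat) : Int) := by
      rw [haux]; push_cast; simp
    rw [PySem.List.pyRange_one_cons hlt, List.foldl_cons]
    have hpos : ((pre.length : Nat) : Int) > 0 := by
      have : 0 < pre.length := by omega
      exact_mod_cast this
    rw [if_pos hpos]
    have hget : (PySem.List.pyGet? aux ((pre.length : Nat) : Int)).getD [] = r := by
      rw [PySem.List.pyGet?_natCast, haux]
      simp
    rw [hget]
    have hset : (done.map some ++ List.replicate (r :: rest).length (none : Option (List Char))).set
        done.length (some (((PySem.Chars.splitOn r pvQuote)[0]?).getD []))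
        = (done ++ [((PySem.Chars.splitOn r pvQuote)[0]?).getD []]).map some
          ++ List.replicate rest.length (none : Option (List Char)) := by
      rw [List.set_append]
      simp [List.replicate_succ]
    rw [hset]
    have hres := ih (pre ++ [r]) (done ++ [((PySem.Chars.splitOn r pvQuote)[0]?).getD []])
      (by rw [haux]; simp) (by simp [hlen])
    have hcast : ((pre.length : Nat) : Int) + 1 = (((pre ++ [r]).length : Nat) : Int) := by
      push_cast; simp
    rw [hcast]
    have hcnt : done.length + 1 = (done ++ [((PySem.Chars.splitOn r pvQuote)[0]?).getD []]).length := by simp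
    rw [hcnt, hres]
    simp [Nat.add_comm, Nat.add_assoc, Nat.add_left_comm]

theorem pv_aS_eq (p : List Char) :
    ((PySem.Chars.splitOn p pvQuote)[0]?).getD [] = (pvPartition p pvQuote).1 := by
  rw [show pvQuote = '\"' :: [] from rfl, pv_splitOn_eq, pvSplitF, pvPartition]
  rcases eq_or_ne (PySem.Chars.find p ['\"']) (-1) with hr | hr
  · simp [hr]
  · simp [hr]

theorem pvSplitF_exists_cons (c : Char) (cs l : List Char) :
    ∃ y ys, pvSplitF c cs l = y :: ys := by
  rcases hX : pvSplitF c cs l with _ | ⟨y, ys⟩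
  · exact absurd hX (pvSplitF_ne_nil c cs l)
  · exact ⟨y, ys, rfl⟩

theorem pv_A_eq (output : String) :
    get_instances_ids output
      = (pvSplitF 'I' ("nstanceId\": \"".toList) output.toList).tail.map
          (fun p => String.ofList (pvPartition p pvQuote).1) := by
  unfold get_instances_ids
  have haux : PySem.Chars.splitOn output.toList pvSep
      = pvSplitF 'I' ("nstanceId\": \"".toList) output.toList := by
    rw [pvSep_eq, pv_splitOn_eq]
  obtain ⟨h0, t0, hsplit⟩ := pvSplitF_exists_cons 'I' ("nstanceId\": \"".toList) output.toList
  simp only [haux, hsplit]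
  rw [PySem.List.pyRange_one_cons (by exact_mod_cast Nat.succ_pos t0.length), List.foldl_cons]
  rw [if_neg (by simp)]
  have hf := pv_fold (h0 :: t0) t0 [h0] [] (by simp) (by simp)
  simp only [List.length_cons, List.length_nil, List.map_nil, List.nil_append,
    Nat.add_sub_cancel, List.length_singleton, Nat.cast_one, zero_add] at hf ⊢
  rw [hf]
  simp [pv_aS_eq]

theorem pv_B_eq (output : String) :
    get_instances_ids_alt output
      = (pvSplitF 'I' ("nstanceId\": \"".toList) output.toList).tail.map
          (fun p => String.ofList (pvPartition p pvQuote).1) := by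
  unfold get_instances_ids_alt
  dsimp only
  rcases eq_or_ne (PySem.Chars.find output.toList pvSep) (-1) with hr | hr
  · have hpart : pvPartition output.toList pvSep = (output.toList, [], []) := by
      rw [pvPartition]; simp [hr]
    rw [hpart]
    have hsplit : pvSplitF 'I' ("nstanceId\": \"".toList) output.toList = [output.toList] := by
      rw [pvSplitF, dif_pos (by rw [← pvSep_eq]; exact hr)]
    rw [hsplit]
    simp
  · have hpart : pvPartition output.toList pvSep
        = (output.toList.take (PySem.Chars.find output.toList pvSep).toNat, pvSep,
           output.toList.drop ((PySem.Chars.find output.toList pvSep).toNat + pvSep.length)) := by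
      rw [pvPartition]; simp [hr]
    rw [hpart]
    rw [if_neg (by simp [pvSep_eq])]
    rw [pvAltGo_spec 'I' ("nstanceId\": \"".toList) pvSep_eq _ _ _
      (by simp only [List.length_drop]; omega)]
    conv_rhs => rw [pvSplitF, dif_neg (by rw [← pvSep_eq]; exact hr)]
    simp only [List.tail_cons]
    rfl

theorem get_instances_ids_eq (output : String) :
    get_instances_ids output = get_instances_ids_alt output := by
  rw [pv_A_eq, pv_B_eq]

-- ===== VERDICT (by name: the statement is the Claim_ definition above) =====
theorem get_instances_ids_spec : Claim_equal_get_instances_ids := by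
  intro output _
  unfold Spec_get_instances_ids
  exact get_instances_ids_eq output
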